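-- pv_equiv track=rewrite | github.com/CBurgessTSU/tsu-watchlist | refresh/filter.py | _build_dual_class_suppressed
-- ===== SOURCE A (Python) =====
-- DUAL_CLASS_GROUPS: list[tuple[str, ...]] = [
--     ("GOOGL", "GOOG"),   # Alphabet: keep GOOGL (Class A, voting), drop GOOG
--     ("BRK.B", "BRK.A"),  # Berkshire: keep B shares (accessible), drop A
--     ("MOG.A", "MOG.B"),  # Moog Inc
-- ]
--
-- def _build_dual_class_suppressed(kept_tickers: list[str]) -> set[str]:
--     """Return the set of tickers that should be suppressed due to a preferred
--     dual-class share already being present in kept_tickers."""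
--     suppressed: set[str] = set()
--     for group in DUAL_CLASS_GROUPS:
--         for i, ticker in enumerate(group):
--             if ticker in kept_tickers:
--                 suppressed.update(group[i + 1:])
--                 break
--     return suppressed
-- ===== SOURCE B (Python) =====
-- DUAL_CLASS_GROUPS: list[tuple[str, ...]] = [
--     ("GOOGL", "GOOG"),
--     ("BRK.B", "BRK.A"),
--     ("MOG.A", "MOG.B"),
-- ]
--
-- # Precomputed once: each ticker -> the lower-priority tickers it suppresses
-- # (the rest of its group).  Correct because tails within a group are nested,
-- # so unioning the tails of ALL present members equals the tail of the first
-- # present member.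
-- _TAILS: dict[str, tuple[str, ...]] = {
--     t: group[i + 1:] for group in DUAL_CLASS_GROUPS for i, t in enumerate(group)
-- }
--
-- def _build_dual_class_suppressed(kept_tickers: list[str]) -> set[str]:
--     present = set(kept_tickers)
--     suppressed: set[str] = set()
--     for ticker, tail in _TAILS.items():
--         if ticker in present:
--             suppressed.update(tail)
--     return suppressed
-- ===== Notes on version B (the rewrite author's own statement) =====
-- stated objective: alternative
-- what changed: Instead of searching each group for its first present member and slicing off the tail with a break, B precomputes a ticker->suppressed-tail map once, converts kept_tickers to a set in one pass, and takes the union of the tails of ALL present tickers (no first-hit search, no break, no slicing at call time); nested tails make this union equal A's first-hit tail.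
import Mathlib
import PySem

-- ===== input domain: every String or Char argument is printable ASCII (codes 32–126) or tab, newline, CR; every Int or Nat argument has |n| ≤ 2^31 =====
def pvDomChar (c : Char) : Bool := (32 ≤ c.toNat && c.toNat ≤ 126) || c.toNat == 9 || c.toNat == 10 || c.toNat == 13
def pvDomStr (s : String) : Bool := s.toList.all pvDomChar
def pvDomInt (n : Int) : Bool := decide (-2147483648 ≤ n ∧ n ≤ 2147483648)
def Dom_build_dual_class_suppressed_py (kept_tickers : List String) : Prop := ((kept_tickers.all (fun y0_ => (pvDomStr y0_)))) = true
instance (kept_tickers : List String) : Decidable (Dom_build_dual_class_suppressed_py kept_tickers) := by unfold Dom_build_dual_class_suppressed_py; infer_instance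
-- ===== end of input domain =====

-- B replaces the per-group first-hit search/slice/break with a precomputed ticker->tail map,
-- a one-pass set of kept_tickers, and a union of the tails of all present tickers (objective: alternative).


-- ===== PORT A =====
-- Port of A: per group, find the first member present in kept_tickers (enumerate);
-- on hit, set.update with the tail slice group[i+1:] and break.
def DUAL_CLASS_GROUPS_A : List (List String) :=
  [["GOOGL", "GOOG"], ["BRK.B", "BRK.A"], ["MOG.A", "MOG.B"]]

-- inner 'for i, ticker in enumerate(group)' with break; 'group[i+1:]' is the remaining list
def pvALoop (kept_tickers : List String) (group : List String) (suppressed : PySem.Set String) : PySem.Set String :=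
  match group with
  | [] => suppressed
  | ticker :: rest =>
      if kept_tickers.contains ticker then PySem.Set.update suppressed rest   -- update + break
      else pvALoop kept_tickers rest suppressed

def build_dual_class_suppressed_py (kept_tickers : List String) : List String :=
  DUAL_CLASS_GROUPS_A.foldl (fun suppressed group => pvALoop kept_tickers group suppressed) PySem.Set.empty

-- ===== PORT B =====
-- Port of B: the precomputed module-level map _TAILS (dict in insertion order),
-- present = set(kept_tickers) built once, then a union of the tails of present tickers.
def pvTAILS : List (String × List String) :=
  [("GOOGL", ["GOOG"]), ("GOOG", []),
   ("BRK.B", ["BRK.A"]), ("BRK.A", []),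
   ("MOG.A", ["MOG.B"]), ("MOG.B", [])]

def build_dual_class_suppressed_py_alt (kept_tickers : List String) : List String :=
  let present := PySem.Set.ofList kept_tickers
  pvTAILS.foldl
    (fun suppressed p =>
      if PySem.Set.contains present p.1 then PySem.Set.update suppressed p.2 else suppressed)
    PySem.Set.empty

-- ===== PRECONDITION & SPEC =====
def Spec_build_dual_class_suppressed_py (kept_tickers : List String) (out : List String) : Prop := out = build_dual_class_suppressed_py_alt kept_tickers
instance (kept_tickers : List String) (out : List String) : Decidable (Spec_build_dual_class_suppressed_py kept_tickers out) := by unfold Spec_build_dual_class_suppressed_py; infer_instance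

-- ===== CLAIM =====
def Claim_equal_build_dual_class_suppressed_py : Prop := ∀ (kept_tickers : List String), Dom_build_dual_class_suppressed_py kept_tickers → Spec_build_dual_class_suppressed_py kept_tickers (build_dual_class_suppressed_py kept_tickers)

-- ===== LEMMAS AND PROOFS =====

-- ===== VERDICT =====
theorem build_dual_class_suppressed_py_spec : Claim_equal_build_dual_class_suppressed_py := by
  intro kept _
  unfold Spec_build_dual_class_suppressed_py
  simp only [build_dual_class_suppressed_py, build_dual_class_suppressed_py_alt,
    DUAL_CLASS_GROUPS_A, pvTAILS, List.foldl, pvALoop,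
    PySem.Set.contains_eq_listContains]
  by_cases h1 : ("GOOGL" ∈ kept) <;>
  by_cases h2 : ("GOOG" ∈ kept) <;>
  by_cases h3 : ("BRK.B" ∈ kept) <;>
  by_cases h4 : ("BRK.A" ∈ kept) <;>
  by_cases h5 : ("MOG.A" ∈ kept) <;>
  by_cases h6 : ("MOG.B" ∈ kept) <;>
  simp [h1, h2, h3, h4, h5, h6, PySem.Set.mem_ofList,
    PySem.Set.update, PySem.Set.add, PySem.Set.empty, List.foldl]
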